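-- pv_equiv track=rewrite | github.com/muhenan/Python-Algo | DateStructureAlgoOOD/DS/Array/array-operations-leetcode-2460.py | applyOperations_extraSpace
-- ===== SOURCE A (Python) =====
-- from typing import List
--
-- def applyOperations_extraSpace(nums: List[int]) -> List[int]:
--     """
--     方法一：使用额外空间
--     Time: O(n)
--     Space: O(n)
--     """
--     length = len(nums)
--     # 步骤1：处理相邻相等的元素
--     for i in range(length - 1):
--         if nums[i] == nums[i + 1]:
--             nums[i] *= 2
--             nums[i + 1] = 0
--
--     # 步骤2：创建新数组，按顺序放入非零元素
--     result = [0] * length  # 创建同样大小的数组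
--     index = 0  # 记录非零元素应该放置的位置
--
--     # 将非零元素按顺序放入新数组
--     for i in range(length):
--         if nums[i] != 0:
--             result[index] = nums[i]
--             index += 1
--
--     return result
-- ===== SOURCE B (Python) =====
-- from typing import List
--
-- def applyOperations_extraSpace(nums: List[int]) -> List[int]:
--     # Step 1 kept verbatim (its in-place mutation of nums is observable behavior).
--     for i in range(len(nums) - 1):
--         if nums[i] == nums[i + 1]:
--             nums[i] *= 2
--             nums[i + 1] = 0
--     # Step 2: one stable sort pushes zeros to the end, preserving non-zero order.
--     return sorted(nums, key=lambda x: x == 0)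
-- ===== Notes on version B (the rewrite author's own statement) =====
-- stated objective: idiomatic
-- what changed: The second phase (preallocated result array filled by an index-placement loop) is replaced by a single stable sort with a boolean key that moves zeros to the end while keeping non-zeros in order; step 1's in-place doubling loop is kept verbatim.
import Mathlib
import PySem

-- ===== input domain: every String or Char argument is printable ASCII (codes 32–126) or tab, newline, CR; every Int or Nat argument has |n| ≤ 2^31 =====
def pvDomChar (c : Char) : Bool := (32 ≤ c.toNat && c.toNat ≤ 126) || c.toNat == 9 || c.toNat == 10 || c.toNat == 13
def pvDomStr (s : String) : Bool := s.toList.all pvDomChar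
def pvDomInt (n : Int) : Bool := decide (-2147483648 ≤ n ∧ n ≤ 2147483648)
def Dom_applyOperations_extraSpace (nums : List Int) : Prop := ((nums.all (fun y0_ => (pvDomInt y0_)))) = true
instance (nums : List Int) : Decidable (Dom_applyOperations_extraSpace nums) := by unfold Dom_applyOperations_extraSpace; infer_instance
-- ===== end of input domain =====

-- B keeps step 1 (and its in-place mutation of nums, which B performs identically) and replaces
-- A's index-placement second phase by one stable sort with a boolean key (idiomatic); the
-- equivalence proved here is about the return value.

-- ===== PORT A =====
-- step 1, identical in both Pythons: 'for i in range(length-1): if nums[i]==nums[i+1]: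
-- nums[i]*=2; nums[i+1]=0', as sequential recursion (each step sees the updated neighbour).
def pvStep1 : List Int → List Int
  | [] => []
  | [a] => [a]
  | a :: b :: rest =>
      if a == b then (2 * a) :: pvStep1 (0 :: rest)
      else a :: pvStep1 (b :: rest)
termination_by l => l.length
decreasing_by all_goals simp

def applyOperations_extraSpace (nums : List Int) : List Int :=
  let nums := pvStep1 nums
  let length : Int := (nums.length : Int)
  -- result = [0] * length; index = 0
  -- for i in range(length): if nums[i] != 0: result[index] = nums[i]; index += 1
  let st := (PySem.List.pyRange 0 length 1).foldl
    (fun (st : List Int × Nat) i =>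
      let v := PySem.List.pyGetD nums i 0
      if v ≠ 0 then (st.1.set st.2 v, st.2 + 1) else st)
    (List.replicate nums.length (0 : Int), 0)
  st.1

-- ===== PORT B =====
-- 'return sorted(nums, key=lambda x: x == 0)': Python's bool key orders False < True,
-- which is exactly the Int key (if x == 0 then 1 else 0) used here (bool is an int in Python).
def applyOperations_extraSpace_alt (nums : List Int) : List Int :=
  let nums := pvStep1 nums
  PySem.List.sorted nums (fun x => if x == 0 then (1 : Int) else 0)

-- ===== PRECONDITION & SPEC =====
def Spec_applyOperations_extraSpace (nums : List Int) (out : List Int) : Prop := out = applyOperations_extraSpace_alt nums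
instance (nums : List Int) (out : List Int) : Decidable (Spec_applyOperations_extraSpace nums out) := by unfold Spec_applyOperations_extraSpace; infer_instance

-- ===== CLAIM (what is proved, stated in full; the proofs are below) =====
def Claim_equal_applyOperations_extraSpace : Prop := ∀ (nums : List Int), Dom_applyOperations_extraSpace nums → Spec_applyOperations_extraSpace nums (applyOperations_extraSpace nums)

-- ===== LEMMAS AND PROOFS =====

theorem pvSetMid {α : Type} (F : List α) (y : α) (ys : List α) (v : α) :
    (F ++ y :: ys).set F.length v = F ++ v :: ys := by
  induction F with
  | nil => rfl
  | cons a F ih => simp [ih]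

-- A's placement loop over any list xs: nonzeros of xs in order, then the untouched zero padding.
theorem pvPlace_eq (xs F : List Int) (m : Nat) :
    xs.foldl (fun (st : List Int × Nat) v => if v ≠ 0 then (st.1.set st.2 v, st.2 + 1) else st)
      (F ++ List.replicate (xs.length + m) (0 : Int), F.length)
    = (F ++ xs.filter (fun x => !(x == 0)) ++
        List.replicate (xs.length + m - (xs.filter (fun x => !(x == 0))).length) (0 : Int),
       F.length + (xs.filter (fun x => !(x == 0))).length) := by
  induction xs generalizing F m with
  | nil => simp
  | cons v xs ih =>
      by_cases hv : v = 0
      · subst hv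
        simp only [List.foldl_cons, List.length_cons]
        rw [if_neg (fun hc => hc rfl)]
        have harr : xs.length + 1 + m = xs.length + (m + 1) := by omega
        rw [harr, ih F (m + 1)]
        simp
      · have hb : ((v : Int) == 0) = false := by simpa using hv
        simp only [List.foldl_cons, List.length_cons]
        rw [if_pos hv]
        have harr : xs.length + 1 + m = (xs.length + m) + 1 := by omega
        rw [harr, List.replicate_succ, pvSetMid]
        have h := ih (F ++ [v]) m
        simp only [List.length_append, List.length_cons, List.length_nil] at h
        rw [show F ++ v :: List.replicate (xs.length + m) (0:Int)
              = (F ++ [v]) ++ List.replicate (xs.length + m) (0:Int) by simp, h]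
        simp only [List.filter_cons, hb, Bool.not_false, if_true, List.length_cons,
          Nat.succ_sub_succ, List.append_assoc, List.cons_append, List.nil_append, Prod.mk.injEq]
        exact ⟨trivial, by omega⟩

-- stable insertion with the 0/1 key into (nonzeros ++ zeros): a zero goes to the very end,
-- a nonzero right before the zeros.
theorem pvInsert01 (A B : List Int) (x : Int)
    (hA : ∀ a ∈ A, a ≠ 0) (hB : ∀ b ∈ B, b = 0) :
    PySem.List.insertBy
      (fun a b => decide ((if a == 0 then (1:Int) else 0) < (if b == 0 then (1:Int) else 0))) x (A ++ B)
    = if x = 0 then A ++ B ++ [x] else A ++ x :: B := by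
  by_cases hx : x = 0
  · rw [if_pos hx]
    apply PySem.List.insertBy_of_forall_not_before
    intro y hy
    subst hx
    simp only [BEq.rfl, if_true]
    by_cases hy0 : y = 0 <;> simp [hy0]
  · rw [if_neg hx]
    have hxb : ((x : Int) == 0) = false := by simpa using hx
    induction A with
    | nil =>
        cases B with
        | nil => simp [PySem.List.insertBy]
        | cons b B' =>
            have hb0 : b = 0 := hB b (by simp)
            simp [PySem.List.insertBy, hb0, hx]
    | cons a A' ihA =>
        have ha : a ≠ 0 := hA a (by simp)
        have hab : ((a : Int) == 0) = false := by simpa using ha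
        simp only [List.cons_append, PySem.List.insertBy, hxb, hab]
        rw [ihA (fun y hy => hA y (by simp [hy]))]
        simp

-- the insertion-sort fold with the 0/1 key keeps the invariant "nonzeros ++ zeros".
theorem pvFoldSort (xs A B : List Int)
    (hA : ∀ a ∈ A, a ≠ 0) (hB : ∀ b ∈ B, b = 0) :
    xs.foldl (fun acc x => PySem.List.insertBy
      (fun a b => decide ((if a == 0 then (1:Int) else 0) < (if b == 0 then (1:Int) else 0))) x acc)
      (A ++ B)
    = (A ++ xs.filter (fun x => !(x == 0))) ++ (B ++ xs.filter (fun x => x == 0)) := by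
  induction xs generalizing A B with
  | nil => simp
  | cons v xs ih =>
      simp only [List.foldl_cons]
      rw [pvInsert01 A B v hA hB]
      by_cases hv : v = 0
      · rw [if_pos hv]
        have hB' : ∀ b ∈ B ++ [v], b = 0 := by
          intro b hb
          rcases List.mem_append.1 hb with h | h
          · exact hB b h
          · rw [List.mem_singleton.1 h]; exact hv
        rw [show A ++ B ++ [v] = A ++ (B ++ [v]) by simp]
        rw [ih A (B ++ [v]) hA hB']
        have hbt : ((v:Int) == 0) = true := by simpa using hv
        simp [hbt]
      · rw [if_neg hv]
        have hA' : ∀ a ∈ A ++ [v], a ≠ 0 := by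
          intro a ha
          rcases List.mem_append.1 ha with h | h
          · exact hA a h
          · rw [List.mem_singleton.1 h]; exact hv
        rw [show A ++ v :: B = (A ++ [v]) ++ B by simp]
        rw [ih (A ++ [v]) B hA' hB]
        have hbf : ((v:Int) == 0) = false := by simpa using hv
        simp [hbf]

-- the zero padding of A's result is exactly the zeros a stable sort puts at the end.
theorem pvPad_eq_filterZero (xs : List Int) :
    List.replicate (xs.length - (xs.filter (fun x => !(x == 0))).length) (0 : Int)
    = xs.filter (fun x => x == 0) := by
  have hlen : (xs.filter (fun x => !(x == 0))).length + (xs.filter (fun x => x == 0)).length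
      = xs.length := by
    induction xs with
    | nil => simp
    | cons v xs ih =>
        by_cases hv : v = 0
        · have : ((v:Int) == 0) = true := by simpa using hv
          simp [this]; omega
        · have : ((v:Int) == 0) = false := by simpa using hv
          simp [this]; omega
  have hall : ∀ b ∈ xs.filter (fun x => x == 0), b = (0 : Int) := by
    intro b hb
    have := (List.mem_filter.1 hb).2
    simpa using this
  rw [show xs.length - (xs.filter (fun x => !(x == 0))).length
        = (xs.filter (fun x => x == 0)).length by omega]
  exact (List.eq_replicate_of_mem hall).symm

theorem pvMain (nums : List Int) :
    applyOperations_extraSpace nums = applyOperations_extraSpace_alt nums := by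
  unfold applyOperations_extraSpace applyOperations_extraSpace_alt
  dsimp only
  set ys := pvStep1 nums with hys
  rw [PySem.List.foldl_pyRange_zero_pyGetD' ys (0:Int)
    (fun (st : List Int × Nat) v => if v ≠ 0 then (st.1.set st.2 v, st.2 + 1) else st)
    (List.replicate ys.length (0 : Int), 0)]
  have hplace := pvPlace_eq ys [] 0
  simp only [List.nil_append, List.length_nil, Nat.add_zero, Nat.zero_add] at hplace
  rw [hplace]
  rw [PySem.List.sorted_eq_foldl_insertBy ys (fun x => if x == 0 then (1:Int) else 0)]
  have hsort := pvFoldSort ys [] [] (by simp) (by simp)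
  simp only [List.nil_append] at hsort
  rw [hsort, pvPad_eq_filterZero ys]

-- ===== VERDICT (by name: the statement is the Claim_ definition above) =====
theorem applyOperations_extraSpace_spec : Claim_equal_applyOperations_extraSpace := by
  intro nums _
  exact pvMain nums
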